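-- pv_equiv track=rewrite | github.com/RodrigoD27avila/Blob | projects/diferencas.py | makeformul
-- ===== SOURCE A (Python) =====
-- from itertools import combinations
--
-- def rmul(T):
-- 	re = 1;
-- 	for x in T:
-- 		re *= x
-- 	return re
--
-- def solvecomb(L, n):
-- 	re = 0;
-- 	for x in combinations(L, r=n):
-- 		re += rmul(x)
-- 	return re;
--
-- def poly(X):
-- 	po = []
-- 	for x in range(len(X)+1):
-- 		solv = solvecomb(X, x)
-- 		po.append((x % 2) != 0 and -solv or solv)
-- 	return po
--
-- def formul(X, Re):
-- 	form = []
-- 	for x in range(len(X)):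
-- 		po = poly(X[0:x])
-- 		po.reverse()
-- 		form.append((Re[x], po))
-- 	return form
--
-- def makeformul(X, Re):
-- 	form = [0]*len(X)
-- 	f = formul(X, Re)
-- 	for c, pol in f:
-- 		for x in range(len(pol)):
-- 			form[x] += pol[x] * c
-- 	form.reverse()
-- 	return form
-- ===== SOURCE B (Python) =====
-- def makeformul(X, Re):
--     n = len(X)
--     form = [0] * n
--     p = [1]  # coefficients of prod_{i<x}(t - X[i]); p[j] = coeff of t^j
--     for x in range(n):
--         c = Re[x]
--         for j in range(len(p)):
--             form[j] += c * p[j]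
--         a = X[x]
--         # p := p * (t - a)
--         p = [s - q for s, q in zip([0] + p, [a * t for t in p] + [0])]
--     form.reverse()
--     return form
-- ===== Notes on version B (the rewrite author's own statement) =====
-- stated objective: faster
-- what changed: Replaces the per-prefix sums over all combinations (elementary symmetric sums recomputed from scratch, exponential) by one incremental expansion of the product (t - x_i): the coefficient vector is updated in O(len) per element and accumulated into the result in the same pass.
import Mathlib
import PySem

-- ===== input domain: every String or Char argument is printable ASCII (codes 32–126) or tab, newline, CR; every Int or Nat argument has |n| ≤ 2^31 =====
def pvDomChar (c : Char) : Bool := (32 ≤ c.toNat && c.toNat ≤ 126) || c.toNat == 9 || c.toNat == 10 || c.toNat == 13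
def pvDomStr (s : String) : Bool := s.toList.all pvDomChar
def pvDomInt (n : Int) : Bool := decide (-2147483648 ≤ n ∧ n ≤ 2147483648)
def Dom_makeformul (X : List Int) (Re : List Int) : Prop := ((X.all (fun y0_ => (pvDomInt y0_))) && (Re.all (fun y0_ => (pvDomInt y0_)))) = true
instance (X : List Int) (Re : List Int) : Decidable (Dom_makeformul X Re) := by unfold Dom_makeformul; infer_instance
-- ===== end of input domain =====

-- B replaces A's exponential sum over all combinations by an O(n^2) incremental
-- expansion of the product (t - x_i) (one coefficient-vector update per element).

-- ===== PORT A =====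
def rmulA (T : List Int) : Int := T.foldl (fun re x => re * x) 1

-- itertools.combinations(L, n) in its lexicographic index order
def combosA : List Int → Nat → List (List Int)
  | _, 0 => [[]]
  | [], _ + 1 => []
  | x :: xs, n + 1 => (combosA xs n).map (fun c => x :: c) ++ combosA xs (n + 1)

def solvecombA (L : List Int) (n : Nat) : Int :=
  (combosA L n).foldl (fun re x => re + rmulA x) 0

-- '(x % 2) != 0 and -solv or solv' : -solv if x is odd and -solv is truthy, else solv
def polyA (X : List Int) : List Int :=
  (List.range (X.length + 1)).foldl
    (fun po x =>
      let solv := solvecombA X x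
      po ++ [if x % 2 ≠ 0 ∧ -solv ≠ 0 then -solv else solv]) []

def formulA (X : List Int) (Re : List Int) : List (Int × List Int) :=
  (List.range X.length).foldl
    (fun form (x : Nat) =>
      let po := (polyA (PySem.List.slice X (some 0) (some (x : Int)))).reverse
      form ++ [(PySem.List.pyGetD Re (x : Int) 0, po)]) []

def makeformul (X : List Int) (Re : List Int) : List Int :=
  let form0 := List.replicate X.length (0 : Int)
  let f := formulA X Re
  let form := f.foldl
    (fun form cp =>
      (List.range cp.2.length).foldl
        (fun fm (x : Nat) =>
          fm.set x (PySem.List.pyGetD fm (x : Int) 0 + PySem.List.pyGetD cp.2 (x : Int) 0 * cp.1))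
        form) form0
  form.reverse

-- ===== PORT B =====
-- p := p * (t - a) : zip of the shifted and the scaled coefficient vector
def mulstepB (a : Int) (p : List Int) : List Int :=
  List.zipWith (fun s q => s - q) (0 :: p) (p.map (fun t => a * t) ++ [0])

def makeformul_alt (X : List Int) (Re : List Int) : List Int :=
  let n := X.length
  let st := (List.range n).foldl
    (fun (st : List Int × List Int) (x : Nat) =>
      let c := PySem.List.pyGetD Re (x : Int) 0
      let form := (List.range st.2.length).foldl
        (fun fm (j : Nat) => fm.set j (PySem.List.pyGetD fm (j : Int) 0 + c * PySem.List.pyGetD st.2 (j : Int) 0)) st.1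
      let a := PySem.List.pyGetD X (x : Int) 0
      (form, mulstepB a st.2))
    (List.replicate n (0 : Int), [1])
  st.1.reverse

-- ===== PRECONDITION & SPEC =====
-- Pre_ excludes len(X) > len(Re), where both Pythons raise IndexError at Re[x].
def Pre_makeformul (X : List Int) (Re : List Int) : Prop := X.length ≤ Re.length
instance (X : List Int) (Re : List Int) : Decidable (Pre_makeformul X Re) := by
  unfold Pre_makeformul; infer_instance
def pvWitness_makeformul : List Int × List Int := ([1, 2], [3, 4])

def Spec_makeformul (X : List Int) (Re : List Int) (out : List Int) : Prop := out = makeformul_alt X Re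
instance (X : List Int) (Re : List Int) (out : List Int) : Decidable (Spec_makeformul X Re out) := by unfold Spec_makeformul; infer_instance

-- ===== CLAIM (what is proved, stated in full; the proofs are below) =====
def Claim_equal_makeformul : Prop := ∀ (X : List Int) (Re : List Int), Dom_makeformul X Re → Pre_makeformul X Re → Spec_makeformul X Re (makeformul X Re)

-- ===== LEMMAS AND PROOFS =====

-- rmulA is the product
theorem rmulA_eq_prod (T : List Int) : rmulA T = T.prod := by
  rw [List.prod_eq_foldl]; rfl

theorem rmulA_cons (x : Int) (c : List Int) : rmulA (x :: c) = x * rmulA c := by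
  simp [rmulA_eq_prod]

-- solvecombA as a sum
theorem foldl_add_rmul (l : List (List Int)) (a : Int) :
    l.foldl (fun re x => re + rmulA x) a = a + (l.map rmulA).sum := by
  induction l generalizing a with
  | nil => simp
  | cons h t ih => simp [ih, add_assoc]

theorem solvecombA_eq_sum (L : List Int) (n : Nat) :
    solvecombA L n = ((combosA L n).map rmulA).sum := by
  simp [solvecombA, foldl_add_rmul]

theorem solvecombA_zero (L : List Int) : solvecombA L 0 = 1 := by
  simp [solvecombA_eq_sum, combosA, rmulA]

theorem solvecombA_nil (n : Nat) : solvecombA [] (n + 1) = 0 := by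
  simp [solvecombA_eq_sum, combosA]

theorem solvecombA_cons (x : Int) (xs : List Int) (n : Nat) :
    solvecombA (x :: xs) (n + 1) = x * solvecombA xs n + solvecombA xs (n + 1) := by
  simp only [solvecombA_eq_sum, combosA, List.map_append, List.map_map, List.sum_append]
  congr 1
  have : ((combosA xs n).map fun c => rmulA (x :: c)).sum
      = ((combosA xs n).map fun c => x * rmulA c).sum := by
    congr 1; apply List.map_congr_left; intro c _; exact rmulA_cons x c
  rw [show (rmulA ∘ fun c => x :: c) = fun c => x * rmulA c from funext fun c => rmulA_cons x c]
  simpa using List.sum_map_mul_left (combosA xs n) rmulA x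

theorem combosA_big (L : List Int) (n : Nat) (h : L.length < n) : combosA L n = [] := by
  induction L generalizing n with
  | nil => cases n with
    | zero => omega
    | succ m => rfl
  | cons x xs ih => cases n with
    | zero => omega
    | succ m =>
      simp at h
      simp [combosA, ih m (by omega), ih (m+1) (by omega)]

theorem solvecombA_big (L : List Int) (n : Nat) (h : L.length < n) : solvecombA L n = 0 := by
  simp [solvecombA_eq_sum, combosA_big L n h]

theorem solvecombA_snoc (M : List Int) (a : Int) (n : Nat) :
    solvecombA (M ++ [a]) (n + 1) = solvecombA M (n + 1) + a * solvecombA M n := by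
  induction M generalizing n with
  | nil =>
    cases n with
    | zero => simp [solvecombA_nil, solvecombA_zero]; simp [solvecombA_eq_sum, combosA, rmulA]
    | succ m =>
      have h1 : solvecombA ([] ++ [a]) (m + 1 + 1) = 0 :=
        solvecombA_big _ _ (by simp)
      simpa using h1.trans (by simp [solvecombA_nil])
  | cons x xs ih =>
    cases n with
    | zero =>
      simp only [List.cons_append, solvecombA_cons, solvecombA_zero, ih 0]
      cases xs with
      | nil => simp [solvecombA_eq_sum, combosA]
      | cons y ys => ring
    | succ m =>
      simp only [List.cons_append, solvecombA_cons, ih m, ih (m+1)]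
      ring

-- coefficient vector of prod_{i in M} (t - i): index j holds the coeff of t^j
def spc (M : List Int) : List Int :=
  (List.range (M.length + 1)).map
    (fun j => (-1 : Int) ^ (M.length - j) * solvecombA M (M.length - j))

theorem spc_nil : spc [] = [1] := by
  simp [spc, solvecombA_zero, List.range_succ]

theorem spc_length (M : List Int) : (spc M).length = M.length + 1 := by simp [spc]

theorem mulstepB_length (a : Int) (p : List Int) :
    (mulstepB a p).length = p.length + 1 := by simp [mulstepB]

theorem spc_snoc (M : List Int) (a : Int) : spc (M ++ [a]) = mulstepB a (spc M) := by
  apply List.ext_getElem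
  · simp [spc_length, mulstepB_length]
  intro j hj hj2
  have hn : j < M.length + 2 := by simp [spc_length] at hj; omega
  have hspM : (spc M).length = M.length + 1 := spc_length M
  simp only [mulstepB]
  rw [List.getElem_zipWith]
  have hL : (spc (M ++ [a]))[j] =
      (-1 : Int) ^ (M.length + 1 - j) * solvecombA (M ++ [a]) (M.length + 1 - j) := by
    simp [spc]
  rw [hL]
  rcases Nat.eq_zero_or_pos j with hj0 | hjpos
  · subst hj0
    have h1 : solvecombA (M ++ [a]) (M.length + 1)
        = solvecombA M (M.length + 1) + a * solvecombA M M.length := solvecombA_snoc ..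
    have h2 : solvecombA M (M.length + 1) = 0 := solvecombA_big _ _ (by omega)
    have h3 : ((spc M).map (fun t => a * t) ++ [0])[0]'(by simp only [List.length_append, List.length_map, hspM, List.length_singleton]; omega)
        = a * ((-1 : Int) ^ M.length * solvecombA M M.length) := by
      rw [List.getElem_append_left (by simp [hspM])]
      simp [spc]
    simp only [List.getElem_cons_zero, h3, Nat.sub_zero]
    rw [h1, h2, pow_succ]
    ring
  · obtain ⟨k, rfl⟩ : ∃ k, j = k + 1 := ⟨j - 1, by omega⟩
    rw [List.getElem_cons_succ]
    rcases Nat.lt_or_ge k M.length with hk | hk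
    · -- middle entries
      have h4 : ((spc M).map (fun t => a * t) ++ [0])[k+1]'(by simp [hspM]; omega)
          = a * ((-1 : Int) ^ (M.length - (k+1)) * solvecombA M (M.length - (k+1))) := by
        rw [List.getElem_append_left (by simp only [List.length_map, hspM]; omega)]
        simp [spc]
      have h5 : (spc M)[k]'(by omega) =
          (-1 : Int) ^ (M.length - k) * solvecombA M (M.length - k) := by simp [spc]
      rw [h4, h5]
      have hd : M.length + 1 - (k + 1) = (M.length - (k + 1)) + 1 := by omega
      have hd2 : M.length - k = (M.length - (k + 1)) + 1 := by omega
      rw [hd, solvecombA_snoc, hd2, pow_succ]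
      ring
    · -- top entry j = M.length + 1
      have hk' : k = M.length := by omega
      subst hk'
      have h4 : ((spc M).map (fun t => a * t) ++ [0])[M.length+1]'(by simp [hspM])
          = 0 := by
        rw [List.getElem_append_right (by simp [hspM])]
        simp [hspM]
      have h5 : (spc M)[M.length]'(by omega) =
          (-1 : Int) ^ (M.length - M.length) * solvecombA M (M.length - M.length) := by
        simp [spc]
      rw [h4, h5]
      simp [solvecombA_zero]

theorem foldl_append_singleton {α β : Type} (g : β → α) (l : List β) (acc : List α) :
    l.foldl (fun po x => po ++ [g x]) acc = acc ++ l.map g := by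
  induction l generalizing acc with
  | nil => simp
  | cons h t ih => simp [ih]

theorem polyA_eq_map (M : List Int) :
    polyA M = (List.range (M.length + 1)).map (fun x => (-1 : Int) ^ x * solvecombA M x) := by
  unfold polyA
  rw [foldl_append_singleton (fun x =>
    if x % 2 ≠ 0 ∧ -(solvecombA M x) ≠ 0 then -(solvecombA M x) else solvecombA M x)]
  simp only [List.nil_append]
  apply List.map_congr_left
  intro x _
  rcases Nat.even_or_odd x with he | ho
  · have hx : x % 2 = 0 := Nat.even_iff.mp he
    simp [hx, he.neg_one_pow]
  · have hx : x % 2 ≠ 0 := by rw [Nat.odd_iff] at ho; omega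
    by_cases hs : solvecombA M x = 0
    · simp [hx, hs]
    · simp [hx, hs, ho.neg_one_pow]

theorem polyA_reverse (M : List Int) : (polyA M).reverse = spc M := by
  apply List.ext_getElem
  · simp [polyA_eq_map, spc_length]
  intro j hj hj2
  have hlen : (polyA M).length = M.length + 1 := by simp [polyA_eq_map]
  have hj' : j < M.length + 1 := by rw [spc_length] at hj2; omega
  rw [List.getElem_reverse]
  simp [polyA_eq_map, spc]

theorem formulA_eq_map (X Re : List Int) :
    formulA X Re = (List.range X.length).map
      (fun (x : Nat) => (PySem.List.pyGetD Re (x : Int) 0, spc (X.take x))) := by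
  unfold formulA
  refine (foldl_append_singleton (fun (x : Nat) =>
    (PySem.List.pyGetD Re (x : Int) 0,
      (polyA (PySem.List.slice X (some 0) (some (x : Int)))).reverse))
    (List.range X.length) []).trans ?_
  simp only [List.nil_append]
  apply List.map_congr_left
  intro x _
  rw [PySem.List.slice_zero_start, PySem.List.slice_to_natCast, polyA_reverse]

theorem inner_comm (p : List Int) (c : Int) (l : List Nat) (form : List Int) :
    l.foldl (fun fm j => fm.set j (PySem.List.pyGetD fm (j : Int) 0
        + c * PySem.List.pyGetD p (j : Int) 0)) form
      = l.foldl (fun fm x => fm.set x (PySem.List.pyGetD fm (x : Int) 0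
        + PySem.List.pyGetD p (x : Int) 0 * c)) form := by
  have hfun : (fun (fm : List Int) (j : Nat) => fm.set j (PySem.List.pyGetD fm (j : Int) 0
        + c * PySem.List.pyGetD p (j : Int) 0))
      = (fun (fm : List Int) (x : Nat) => fm.set x (PySem.List.pyGetD fm (x : Int) 0
        + PySem.List.pyGetD p (x : Int) 0 * c)) := by
    funext fm j; rw [Int.mul_comm]
  rw [hfun]

theorem loop_eq (X Re : List Int) (init : List Int) (m : Nat) (hm : m ≤ X.length) :
    (List.range m).foldl
      (fun (st : List Int × List Int) (x : Nat) =>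
        let c := PySem.List.pyGetD Re (x : Int) 0
        let form := (List.range st.2.length).foldl
          (fun fm (j : Nat) => fm.set j (PySem.List.pyGetD fm (j : Int) 0
            + c * PySem.List.pyGetD st.2 (j : Int) 0)) st.1
        let a := PySem.List.pyGetD X (x : Int) 0
        (form, mulstepB a st.2)) (init, [1])
    = (((List.range m).map (fun (x : Nat) => (PySem.List.pyGetD Re (x : Int) 0, spc (X.take x)))).foldl
        (fun form cp =>
          (List.range cp.2.length).foldl
            (fun fm (x : Nat) => fm.set x (PySem.List.pyGetD fm (x : Int) 0
              + PySem.List.pyGetD cp.2 (x : Int) 0 * cp.1)) form) init,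
       spc (X.take m)) := by
  induction m with
  | zero => simp [spc_nil]
  | succ m ih =>
    have hm' : m ≤ X.length := by omega
    rw [List.range_succ, List.foldl_append, List.map_append, List.foldl_append, ih hm']
    have hXm : PySem.List.pyGetD X (m : Int) 0 = X[m]'(by omega) := by
      rw [PySem.List.pyGetD_natCast, List.getD_eq_getElem _ _ (by omega)]
    simp only [List.foldl_cons, List.foldl_nil, List.map_cons, List.map_nil]
    refine Prod.ext ?_ ?_
    · exact inner_comm (spc (X.take m)) (PySem.List.pyGetD Re (m : Int) 0) _ _
    · show mulstepB (PySem.List.pyGetD X (m : Int) 0) (spc (X.take m)) = spc (X.take (m + 1))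
      rw [hXm, ← spc_snoc, List.take_concat_get' X m (by omega)]

theorem makeformul_eq_alt (X Re : List Int) : makeformul X Re = makeformul_alt X Re := by
  simp only [makeformul, makeformul_alt]
  rw [formulA_eq_map, loop_eq X Re (List.replicate X.length 0) X.length le_rfl]

-- ===== VERDICT (by name: the statement is the Claim_ definition above) =====
theorem makeformul_spec : Claim_equal_makeformul := by
  intro X Re _ _
  exact makeformul_eq_alt X Re
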